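-- pv_equiv track=rewrite | github.com/vnborsan/MUSCO | src/educationalfilters/combined_filter_codes.py | if1_allows
-- ===== SOURCE A (Python) =====
-- def _parse_moves_str(melodic_string: str):
--     s = str(melodic_string).strip()
--     if not s:
--         return []
--     return list(map(int, s.split()))
--
-- def if1_allows(melodic_string: str) -> bool:
--     """
--     IF1: allowed {0, ±2, ±3, ±4}; ±1 only if isolated (no adjacent ±1).
--     """
--     try:
--         moves = _parse_moves_str(melodic_string)
--     except Exception:
--         return False
--     allowed_non_m2 = {0, 2, -2, 3, -3, 4, -4}
--     n = len(moves)
--     for i, m in enumerate(moves):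
--         if m in allowed_non_m2:
--             continue
--         if abs(m) == 1:
--             left_is_m2  = (i > 0 and abs(moves[i-1]) == 1)
--             right_is_m2 = (i < n - 1 and abs(moves[i+1]) == 1)
--             if left_is_m2 or right_is_m2:
--                 return False
--             continue
--         return False
--     return True
-- ===== SOURCE B (Python) =====
-- def _parse_moves_str(melodic_string: str):
--     s = str(melodic_string).strip()
--     if not s:
--         return []
--     return list(map(int, s.split()))
--
-- def if1_allows(melodic_string: str) -> bool:
--     """
--     IF1: allowed {0, +-2, +-3, +-4}; +-1 only if isolated.
--     Index-based reformulation: after a magnitude bound on |m|, collect the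
--     positions of the +-1 moves and demand every consecutive pair of those
--     positions is at least 2 apart (no two +-1 moves can be neighbours).
--     """
--     try:
--         moves = _parse_moves_str(melodic_string)
--     except Exception:
--         return False
--     mags = [abs(m) for m in moves]
--     if any(g > 4 for g in mags):
--         return False
--     ones = [i for i, g in enumerate(mags) if g == 1]
--     return all(b - a >= 2 for a, b in zip(ones, ones[1:]))
-- ===== Notes on version B (the rewrite author's own statement) =====
-- stated objective: alternative
-- what changed: Instead of A's fused loop with per-index left/right neighbour lookups, B extracts the sorted list of positions of the +-1 moves and checks that consecutive positions are at least 2 apart (after a simple magnitude bound), so the adjacency rule becomes a gap condition on an index list.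
import Mathlib
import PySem

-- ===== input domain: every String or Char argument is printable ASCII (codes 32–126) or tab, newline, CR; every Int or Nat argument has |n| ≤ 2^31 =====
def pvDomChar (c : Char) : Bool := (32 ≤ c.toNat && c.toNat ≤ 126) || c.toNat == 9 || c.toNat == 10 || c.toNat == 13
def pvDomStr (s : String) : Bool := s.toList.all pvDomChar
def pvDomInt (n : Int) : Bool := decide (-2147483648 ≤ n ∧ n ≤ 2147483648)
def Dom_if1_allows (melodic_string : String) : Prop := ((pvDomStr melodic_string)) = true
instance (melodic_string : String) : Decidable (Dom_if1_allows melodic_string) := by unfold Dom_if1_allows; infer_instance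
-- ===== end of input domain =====

-- B replaces A's fused loop with per-index neighbour lookups by an index-list formulation:
-- bound the magnitudes, then collect the positions of the ±1 moves and require consecutive
-- positions to be ≥ 2 apart; objective: alternative (same O(n) cost, different shape).

-- ===== PORT A =====
-- _parse_moves_str, shared by both Pythons verbatim: strip, empty → [], else map int over split()
-- (an int() ValueError, caught by the callers' try/except, is `none` here)
def if1ParseMoves? (melodic_string : String) : Option (List Int) :=
  let s := PySem.Str.strip melodic_string
  if PySem.Str.len s = 0 then some []
  else (PySem.Str.split₀ s).mapM PySem.Int.ofStr?

-- A's loop: for i, m in enumerate(moves), with left/right neighbour lookups by index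
-- (left_is_m2 / right_is_m2 are inlined into the `if`; the short-circuit `and`s keep the
-- neighbour reads guarded exactly as in the Python)
def if1Loop (moves : List Int) (i : Nat) : Bool :=
  if h : i < moves.length then
    if moves[i] == 0 || moves[i] == 2 || moves[i] == -2 || moves[i] == 3 || moves[i] == -3 || moves[i] == 4 || moves[i] == -4 then
      if1Loop moves (i + 1)
    else if moves[i].natAbs == 1 then
      if (decide (0 < i) && ((moves.getD (i - 1) 0).natAbs == 1)) ||
         (decide (i < moves.length - 1) && ((moves.getD (i + 1) 0).natAbs == 1)) then
        false
      else if1Loop moves (i + 1)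
    else false
  else true
termination_by moves.length - i

def if1_allows (melodic_string : String) : Bool :=
  match if1ParseMoves? melodic_string with
  | none => false
  | some moves => if1Loop moves 0

-- ===== PORT B =====
def if1_allows_alt (melodic_string : String) : Bool :=
  match if1ParseMoves? melodic_string with
  | none => false
  | some moves =>
    let mags : List Int := moves.map (fun m => (m.natAbs : Int))
    if mags.any (fun g => decide (4 < g)) then false
    else
      let ones : List Int :=
        (PySem.List.enumerate mags 0).filterMap (fun p => if p.2 == 1 then some p.1 else none)
      (ones.zip (PySem.List.slice ones (some 1) none)).all (fun p => decide (p.1 + 2 ≤ p.2))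

-- ===== PRECONDITION & SPEC =====
def Spec_if1_allows (melodic_string : String) (out : Bool) : Prop := out = if1_allows_alt melodic_string
instance (melodic_string : String) (out : Bool) : Decidable (Spec_if1_allows melodic_string out) := by unfold Spec_if1_allows; infer_instance

-- ===== CLAIM (what is proved, stated in full; the proofs are below) =====
def Claim_equal_if1_allows : Prop := ∀ (melodic_string : String), Dom_if1_allows melodic_string → Spec_if1_allows melodic_string (if1_allows melodic_string)

-- ===== LEMMAS AND PROOFS =====

-- the per-index condition A's loop enforces at index j
abbrev if1Ok (moves : List Int) (j : Nat) : Prop :=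
  (moves.getD j 0).natAbs ≤ 4 ∧
    ((moves.getD j 0).natAbs = 1 →
      ¬(0 < j ∧ (moves.getD (j - 1) 0).natAbs = 1) ∧
      ¬(j + 1 < moves.length ∧ (moves.getD (j + 1) 0).natAbs = 1))

lemma if1Q_step (moves : List Int) (i : Nat) (hok : if1Ok moves i) :
    decide (∀ j, j < moves.length → i ≤ j → if1Ok moves j)
      = decide (∀ j, j < moves.length → i + 1 ≤ j → if1Ok moves j) := by
  congr 1
  simp only [eq_iff_iff]
  constructor
  · intro hq j hj hij; exact hq j hj (by omega)
  · intro hq j hj hij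
    rcases Nat.eq_or_lt_of_le hij with rfl | hlt
    · exact hok
    · exact hq j hj hlt

lemma if1Q_false (moves : List Int) (i : Nat) (h : i < moves.length) (hbad : ¬ if1Ok moves i) :
    decide (∀ j, j < moves.length → i ≤ j → if1Ok moves j) = false := by
  simp only [decide_eq_false_iff_not]
  intro hq
  exact hbad (hq i h (Nat.le_refl i))

lemma if1getD_eq (moves : List Int) (j : Nat) (h : j < moves.length) :
    moves.getD j 0 = moves[j] := by
  simp [List.getD_eq_getElem?_getD, List.getElem?_eq_getElem h]

lemma if1Loop_spec (moves : List Int) (i : Nat) :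
    if1Loop moves i = decide (∀ j, j < moves.length → i ≤ j → if1Ok moves j) := by
  have main : ∀ k i, moves.length - i = k →
      if1Loop moves i = decide (∀ j, j < moves.length → i ≤ j → if1Ok moves j) := by
    intro k
    induction k with
    | zero =>
      intro i hk
      rw [if1Loop]
      rw [dif_neg (by omega)]
      symm
      simp only [decide_eq_true_eq]
      intro j hj hij; omega
    | succ k ih =>
      intro i hk
      have h : i < moves.length := by omega
      have hg : moves.getD i 0 = moves[i] := if1getD_eq moves i h
      rw [if1Loop, dif_pos h]
      by_cases hm : (moves[i] == 0 || moves[i] == 2 || moves[i] == -2 || moves[i] == 3 || moves[i] == -3 || moves[i] == 4 || moves[i] == -4) = true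
      · rw [if_pos hm, ih (i + 1) (by omega)]
        symm
        apply if1Q_step
        simp only [Bool.or_eq_true, beq_iff_eq] at hm
        constructor
        · rw [hg]; omega
        · rw [hg]; intro h1; exfalso; omega
      · rw [if_neg hm]
        simp only [Bool.or_eq_true, beq_iff_eq] at hm
        push Not at hm
        by_cases habs : (moves[i].natAbs == 1) = true
        · rw [if_pos habs]
          simp only [beq_iff_eq] at habs
          by_cases hbad : ((decide (0 < i) && ((moves.getD (i - 1) 0).natAbs == 1)) ||
              (decide (i < moves.length - 1) && ((moves.getD (i + 1) 0).natAbs == 1))) = true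
          · rw [if_pos hbad]
            symm
            apply if1Q_false moves i h
            intro hok
            simp only [Bool.or_eq_true, Bool.and_eq_true, decide_eq_true_eq, beq_iff_eq] at hbad
            have := hok.2 (by rw [hg]; exact habs)
            rcases hbad with ⟨h1, h2⟩ | ⟨h1, h2⟩
            · exact this.1 ⟨h1, h2⟩
            · exact this.2 ⟨by omega, h2⟩
          · rw [if_neg hbad, ih (i + 1) (by omega)]
            symm
            apply if1Q_step
            simp only [Bool.or_eq_true, Bool.and_eq_true, decide_eq_true_eq, beq_iff_eq] at hbad
            push Not at hbad
            constructor
            · rw [hg]; omega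
            · intro _
              constructor
              · intro ⟨h1, h2⟩; exact absurd h2 (hbad.1 h1)
              · intro ⟨h1, h2⟩; exact absurd h2 (hbad.2 (by omega))
        · rw [if_neg habs]
          simp only [beq_iff_eq] at habs
          symm
          apply if1Q_false moves i h
          intro hok
          have := hok.1
          rw [hg] at this
          omega
  exact main (moves.length - i) i rfl

-- the positions-of-±1 list B builds, characterised
abbrev if1Ones (mags : List Int) : List Int :=
  (PySem.List.enumerate mags 0).filterMap (fun p => if p.2 == 1 then some p.1 else none)

lemma if1Ones_mem (mags : List Int) (x : Int) :
    x ∈ if1Ones mags ↔ ∃ (k : Nat) (h : k < mags.length), x = (k : Int) ∧ mags[k] = 1 := by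
  simp only [if1Ones, List.mem_filterMap, PySem.List.mem_enumerate_iff]
  constructor
  · rintro ⟨p, ⟨k, hk, rfl⟩, hp⟩
    by_cases h1 : ((mags[k] == 1) = true)
    · rw [if_pos (by simpa using h1)] at hp
      have hx := Option.some_inj.mp hp
      exact ⟨k, hk, by omega, by simpa using h1⟩
    · rw [if_neg (by simpa using h1)] at hp
      exact absurd hp (by simp)
  · rintro ⟨k, hk, rfl, h1⟩
    exact ⟨((k : Int), mags[k]), ⟨k, hk, by simp⟩, by simp [h1]⟩

lemma if1Ones_pairwise (mags : List Int) : (if1Ones mags).Pairwise (· < ·) := by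
  have h := PySem.List.pairwise_lt_enumerate mags (0 : Int)
  unfold if1Ones
  refine List.Pairwise.filterMap _ ?_ h
  intro p q hpq x hx y hy
  simp only at hx hy
  split_ifs at hx hy
  all_goals simp_all

lemma if1_core_eq (moves : List Int) :
    if1Loop moves 0 =
      (if (moves.map (fun m => (m.natAbs : Int))).any (fun g => decide (4 < g)) then false
       else ((if1Ones (moves.map (fun m => (m.natAbs : Int)))).zip
           (PySem.List.slice (if1Ones (moves.map (fun m => (m.natAbs : Int)))) (some 1) none)).all
           (fun p => decide (p.1 + 2 ≤ p.2))) := by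
  rw [if1Loop_spec]
  set mags : List Int := moves.map (fun m => (m.natAbs : Int)) with hmags
  have hlen : mags.length = moves.length := by simp [hmags]
  have hmagj : ∀ (j : Nat) (h : j < mags.length),
      mags[j]'h = ((moves[j]'(by omega)).natAbs : Int) := by
    intro j h; simp [hmags]
  set ones : List Int := if1Ones mags with hones
  have honesmem : ∀ x : Int,
      x ∈ ones ↔ ∃ (k : Nat) (h : k < mags.length), x = (k : Int) ∧ mags[k]'h = 1 := by
    intro x; rw [hones]; exact if1Ones_mem mags x
  rw [PySem.List.slice_from ones (by omega : (0:Int) ≤ 1)]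
  rw [show ((1:Int).toNat) = 1 from rfl, List.drop_one]
  have hpw : ones.Pairwise (· < ·) := by rw [hones]; exact if1Ones_pairwise mags
  have hpwg := List.pairwise_iff_getElem.mp hpw
  by_cases hmag : ∀ j, j < moves.length → (moves.getD j 0).natAbs ≤ 4
  · have hany : mags.any (fun g => decide (4 < g)) = false := by
      simp only [List.any_eq_false, decide_eq_true_eq, not_lt]
      intro g hg
      obtain ⟨j, hj, rfl⟩ := List.mem_iff_getElem.mp hg
      have hj' : j < moves.length := by omega
      rw [hmagj j hj]
      have := hmag j hj'
      rw [if1getD_eq moves j hj'] at this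
      omega
    rw [hany, if_neg (by simp)]
    by_cases hpair : ∀ (j : Nat) (h : j + 1 < moves.length),
        ¬((moves[j]'(Nat.lt_of_succ_lt h)).natAbs = 1 ∧ (moves[j+1]'h).natAbs = 1)
    · -- both sides true
      have hall : (ones.zip ones.tail).all (fun p => decide (p.1 + 2 ≤ p.2)) = true := by
        simp only [List.all_eq_true, decide_eq_true_eq]
        intro p hp
        obtain ⟨t, ht, hget⟩ := List.mem_iff_getElem.mp hp
        have htlen : t + 1 < ones.length := by
          simp only [List.length_zip, List.length_tail] at ht; omega
        have ht0 : t < ones.length := by omega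
        have h1 : p.1 = ones[t]'ht0 := by rw [← hget]; simp [List.getElem_zip]
        have h2 : p.2 = ones[t+1]'htlen := by
          rw [← hget]; simp only [List.getElem_zip]; rw [List.getElem_tail]
        have hlt : ones[t]'ht0 < ones[t+1]'htlen := hpwg t (t+1) ht0 htlen (by omega)
        by_contra hc
        have heq : ones[t]'ht0 + 1 = ones[t+1]'htlen := by rw [h1, h2] at hc; omega
        obtain ⟨k1, hk1, he1, hm1⟩ := (honesmem _).mp (List.getElem_mem ht0)
        obtain ⟨k2, hk2, he2, hm2⟩ := (honesmem _).mp (List.getElem_mem htlen)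
        have hk21 : k2 = k1 + 1 := by omega
        rw [hmagj k1 hk1] at hm1
        rw [hmagj k2 hk2] at hm2
        refine hpair k1 (by omega) ⟨by exact_mod_cast hm1, ?_⟩
        have : (moves[k2]'(by omega)).natAbs = 1 := by exact_mod_cast hm2
        subst hk21
        exact this
      rw [hall]
      simp only [decide_eq_true_eq]
      intro j hj _
      have hjlt : j < moves.length := hj
      have hg := if1getD_eq moves j hjlt
      refine ⟨by have := hmag j hjlt; exact this, fun h1 => ⟨?_, ?_⟩⟩
      · rintro ⟨hp, hl⟩
        rw [if1getD_eq moves (j-1) (by omega)] at hl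
        refine hpair (j - 1) (by omega) ?_
        have hje : j - 1 + 1 = j := by omega
        rw [hg] at h1
        constructor
        · exact hl
        · simp only [hje]; exact h1
      · rintro ⟨hp, hr⟩
        rw [if1getD_eq moves (j+1) hp] at hr
        rw [hg] at h1
        exact hpair j hp ⟨h1, hr⟩
    · -- both sides false
      push Not at hpair
      obtain ⟨j, hjlen, hj1, hj2⟩ := hpair
      have hmem1 : ((j : Int)) ∈ ones := (honesmem _).mpr
        ⟨j, by omega, rfl, by rw [hmagj j (by omega)]; exact_mod_cast hj1⟩
      have hmem2 : ((j : Int) + 1) ∈ ones := (honesmem _).mpr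
        ⟨j + 1, by omega, by push_cast; ring, by rw [hmagj (j+1) (by omega)]; exact_mod_cast hj2⟩
      obtain ⟨t, ht, hgt⟩ := List.mem_iff_getElem.mp hmem1
      obtain ⟨t', ht', hgt'⟩ := List.mem_iff_getElem.mp hmem2
      have htt : t < t' := by
        rcases Nat.lt_trichotomy t t' with h | h | h
        · exact h
        · exfalso
          subst h
          exact absurd (hgt.symm.trans hgt') (by omega)
        · exfalso
          have := hpwg t' t ht' ht h
          rw [hgt, hgt'] at this
          omega
      have ht1 : t' = t + 1 := by
        by_contra hne
        have hmid : t + 1 < t' := by omega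
        have hmidlt : t + 1 < ones.length := by omega
        have hlo := hpwg t (t+1) ht hmidlt (by omega)
        have hhi := hpwg (t+1) t' hmidlt ht' hmid
        rw [hgt] at hlo
        rw [hgt'] at hhi
        omega
      have hfail : (ones.zip ones.tail).all (fun p => decide (p.1 + 2 ≤ p.2)) = false := by
        apply List.all_eq_false.mpr
        refine ⟨((j : Int), (j : Int) + 1), ?_, by simp⟩
        apply List.mem_iff_getElem.mpr
        have hz : t < (ones.zip ones.tail).length := by
          simp only [List.length_zip, List.length_tail]; omega
        refine ⟨t, hz, ?_⟩
        simp only [ht1] at hgt'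
        simp only [List.getElem_zip]
        refine Prod.ext ?_ ?_
        · exact hgt
        · show ones.tail[t]'_ = (j : Int) + 1
          rw [List.getElem_tail]
          exact hgt'
      rw [hfail]
      simp only [decide_eq_false_iff_not]
      intro hq
      have hok := hq (j + 1) hjlen (by omega)
      have := (hok.2 (by rw [if1getD_eq moves (j+1) hjlen]; exact hj2)).1
      refine this ⟨by omega, ?_⟩
      rw [show j + 1 - 1 = j from by omega, if1getD_eq moves j (by omega)]
      exact hj1
  · push Not at hmag
    obtain ⟨j, hj, hbig⟩ := hmag
    have hany : mags.any (fun g => decide (4 < g)) = true := by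
      simp only [List.any_eq_true, decide_eq_true_eq]
      have hjm : j < mags.length := by omega
      refine ⟨mags[j]'hjm, List.getElem_mem hjm, ?_⟩
      rw [hmagj j hjm]
      rw [if1getD_eq moves j hj] at hbig
      omega
    rw [hany, if_pos rfl]
    simp only [decide_eq_false_iff_not]
    intro hq
    exact absurd (hq j hj (by omega)).1 (by omega)

-- ===== VERDICT (by name: the statement is the Claim_ definition above) =====
theorem if1_allows_spec : Claim_equal_if1_allows := by
  intro s _
  unfold Spec_if1_allows if1_allows if1_allows_alt
  cases h : if1ParseMoves? s with
  | none => rfl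
  | some moves => exact if1_core_eq moves
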